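-- pv_equiv track=rewrite | github.com/Mumao02/TFG | p.py | extraer_campos_sip
-- ===== SOURCE A (Python) =====
-- def extraer_campos_sip(payload, filtros):
--     info_sip = {}
--     lineas = payload.splitlines()
--     for linea in lineas:
--         for filtro in filtros:
--             if filtro.lower() in linea.lower():
--                 info_sip[filtro] = linea
--     return info_sip
-- ===== SOURCE B (Python) =====
-- def extraer_campos_sip(payload, filtros):
--     lineas = payload.splitlines()
--
--     def ultima_linea(filtro):
--         f = filtro.lower()
--         return next((linea for linea in reversed(lineas) if f in linea.lower()), None)
--
--     info_sip = {}
--     for filtro in filtros: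
--         linea = ultima_linea(filtro)
--         if linea is not None:
--             info_sip[filtro] = linea
--     return info_sip
-- ===== Notes on version B (the rewrite author's own statement) =====
-- stated objective: alternative
-- what changed: B is filter-major: for each filtro it scans the lines in reverse and stops at the first (i.e. last-occurring) matching line, instead of A's line-major pass that keeps overwriting dict entries; Pre_ excludes inputs where two matching filters appear in filtros in the opposite order to their first matching lines, because there the accidental dict key-insertion orders of A (line-discovery order) and B (filtros order) differ (Python's dict == ignores key order, the association-list representation does not).
-- outside the precondition, e.g. on extraer_campos_sip('b\na', ['a', 'b']): A returns {'b': 'b', 'a': 'a'}, B returns {'a': 'a', 'b': 'b'}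
import Mathlib
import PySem

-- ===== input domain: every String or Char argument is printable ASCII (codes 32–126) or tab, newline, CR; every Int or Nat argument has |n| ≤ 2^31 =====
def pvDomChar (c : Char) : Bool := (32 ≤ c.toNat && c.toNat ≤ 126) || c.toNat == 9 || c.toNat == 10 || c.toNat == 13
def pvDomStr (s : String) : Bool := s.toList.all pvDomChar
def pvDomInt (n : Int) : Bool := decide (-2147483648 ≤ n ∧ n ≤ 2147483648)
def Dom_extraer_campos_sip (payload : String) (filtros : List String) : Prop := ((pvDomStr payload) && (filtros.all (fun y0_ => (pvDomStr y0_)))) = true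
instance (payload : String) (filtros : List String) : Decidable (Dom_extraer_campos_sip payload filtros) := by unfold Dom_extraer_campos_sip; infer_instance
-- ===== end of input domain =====

-- B is filter-major (one reverse scan per filtro, stopping at its last matching line) instead of
-- A's line-major overwrite loop; alternative decomposition, same cost.

-- ===== PORT A =====
def extraer_campos_sip (payload : String) (filtros : List String) : List (String × String) :=
  let lineas := PySem.Str.splitlines payload
  (lineas.foldl (fun info linea =>
      filtros.foldl (fun info filtro =>
        if PySem.Str.isIn (PySem.Str.lower filtro) (PySem.Str.lower linea) then info.insert filtro linea
        else info) info)
    (PySem.Dict.empty : PySem.Dict String String)).items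

-- ===== PORT B =====
-- ultima_linea's generator: first hit in the reversed line list (the second argument is the
-- already-lowered filter, like the local variable f in Source B)
def pvUltima : List String → String → Option String
  | [], _ => none
  | linea :: resto, f => if PySem.Str.isIn f (PySem.Str.lower linea) then some linea else pvUltima resto f

def extraer_campos_sip_alt (payload : String) (filtros : List String) : List (String × String) :=
  let lineas := PySem.Str.splitlines payload
  (filtros.foldl (fun info_sip filtro =>
      match pvUltima lineas.reverse (PySem.Str.lower filtro) with
      | some linea => info_sip.insert filtro linea
      | none => info_sip) (PySem.Dict.empty : PySem.Dict String String)).items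

-- ===== PRECONDITION & SPEC =====
-- index of the first line of lineas containing f case-insensitively (= lineas.length if none)
def pvMatchIdx (lineas : List String) (f : String) : Nat :=
  lineas.findIdx (fun l => PySem.Str.isIn (PySem.Str.lower f) (PySem.Str.lower l))

-- Pre_ excludes inputs where two distinct matching filters appear in filtros in the opposite order
-- to their first matching lines in the payload: there both return the same key→value mapping but
-- A's dict key-insertion order (line-discovery order) and B's (filtros order) differ — Python's
-- dict == ignores that order, the association-list representation does not.
def Pre_extraer_campos_sip (payload : String) (filtros : List String) : Prop :=
  List.Pairwise (fun f g =>
    f = g ∨ pvMatchIdx (PySem.Str.splitlines payload) f = (PySem.Str.splitlines payload).length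
          ∨ pvMatchIdx (PySem.Str.splitlines payload) g = (PySem.Str.splitlines payload).length
          ∨ pvMatchIdx (PySem.Str.splitlines payload) f ≤ pvMatchIdx (PySem.Str.splitlines payload) g)
    filtros
instance (payload : String) (filtros : List String) : Decidable (Pre_extraer_campos_sip payload filtros) := by
  unfold Pre_extraer_campos_sip; infer_instance

def pvWitness_extraer_campos_sip : String × List String := ("INVITE sip:x\nVia: 1\nvia: 2", ["invite", "via"])

def Spec_extraer_campos_sip (payload : String) (filtros : List String) (out : List (String × String)) : Prop := out = extraer_campos_sip_alt payload filtros
instance (payload : String) (filtros : List String) (out : List (String × String)) : Decidable (Spec_extraer_campos_sip payload filtros out) := by unfold Spec_extraer_campos_sip; infer_instance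

-- ===== CLAIM (what is proved, stated in full; the proofs are below) =====
def Claim_equal_extraer_campos_sip : Prop := ∀ (payload : String) (filtros : List String), Dom_extraer_campos_sip payload filtros → Pre_extraer_campos_sip payload filtros → Spec_extraer_campos_sip payload filtros (extraer_campos_sip payload filtros)

-- ===== LEMMAS AND PROOFS =====

-- the Pre_ relation, named for the lemmas below (definitionally the lambda in Pre_)
def pvR (L : List String) (f g : String) : Prop :=
  f = g ∨ pvMatchIdx L f = L.length ∨ pvMatchIdx L g = L.length ∨ pvMatchIdx L f ≤ pvMatchIdx L g

-- lookup after A's inner pass over the filters: a matching filter now maps to this line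
theorem pvA_inner_get? (fs : List String) (l : String) (d : PySem.Dict String String) (f : String) :
    ((fs.foldl (fun info filtro => if PySem.Str.isIn (PySem.Str.lower filtro) (PySem.Str.lower l) then info.insert filtro l else info) d).get? f)
    = if f ∈ fs ∧ PySem.Str.isIn (PySem.Str.lower f) (PySem.Str.lower l) = true then some l else d.get? f := by
  induction fs generalizing d with
  | nil => simp
  | cons g gs ih =>
    simp only [List.foldl_cons]
    rw [ih]
    by_cases hf : PySem.Chars.isIn (PySem.Chars.lower f.toList) (PySem.Chars.lower l.toList) = true
    · by_cases hfg : f = g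
      · subst hfg
        simp [hf]
      · by_cases hg : PySem.Chars.isIn (PySem.Chars.lower g.toList) (PySem.Chars.lower l.toList) = true
        · by_cases hgs : f ∈ gs <;> simp [hf, hg, hfg, hgs, PySem.Dict.get?_insert]
        · by_cases hgs : f ∈ gs <;> simp [hf, hg, hfg, hgs]
    · by_cases hfg : f = g
      · subst hfg
        simp [hf]
      · by_cases hg : PySem.Chars.isIn (PySem.Chars.lower g.toList) (PySem.Chars.lower l.toList) = true <;>
          simp [hf, hg, hfg, PySem.Dict.get?_insert]

-- lookup in A's final dict: the last matching line, i.e. the first hit of B's reverse scan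
theorem pvA_outer_get? (fs : List String) (L : List String) (d : PySem.Dict String String) (f : String) :
    ((L.foldl (fun info linea =>
        fs.foldl (fun info filtro => if PySem.Str.isIn (PySem.Str.lower filtro) (PySem.Str.lower linea) then info.insert filtro linea else info) info) d).get? f)
    = if f ∈ fs then (pvUltima L.reverse (PySem.Str.lower f)).or (d.get? f) else d.get? f := by
  induction L using List.reverseRecOn with
  | nil => simp [pvUltima]
  | append_singleton L l ih =>
    rw [List.foldl_append]
    simp only [List.foldl_cons, List.foldl_nil]
    rw [pvA_inner_get?]
    rw [ih]
    by_cases hf : f ∈ fs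
    · by_cases hm : PySem.Chars.isIn (PySem.Chars.lower f.toList) (PySem.Chars.lower l.toList) = true
      · simp [hf, hm, pvUltima]
      · simp [hf, hm, pvUltima]
    · simp [hf]

-- A's key list after the inner pass, as a plain accumulator loop
theorem pvKeys_inner (fs : List String) (l : String) (d : PySem.Dict String String) (acc : List String)
    (h : d.keys = acc) :
    (fs.foldl (fun info filtro => if PySem.Str.isIn (PySem.Str.lower filtro) (PySem.Str.lower l) then info.insert filtro l else info) d).keys
    = fs.foldl (fun orden filtro =>
        if !(orden.contains filtro) && PySem.Str.isIn (PySem.Str.lower filtro) (PySem.Str.lower l)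
        then orden ++ [filtro] else orden) acc := by
  induction fs generalizing d acc with
  | nil => simpa using h
  | cons g gs ih =>
    simp only [List.foldl_cons]
    by_cases hg : PySem.Str.isIn (PySem.Str.lower g) (PySem.Str.lower l) = true
    · rw [if_pos hg]
      by_cases hmem : g ∈ acc
      · have hc : d.contains g = true := (PySem.Dict.contains_iff_mem_keys d g).2 (h ▸ hmem)
        rw [if_neg (by simp [hmem])]
        exact ih _ _ (by rw [PySem.Dict.keys_insert_of_contains d l hc, h])
      · have hc : d.contains g = false :=
          Bool.eq_false_iff.2 (fun h1 => hmem (h ▸ (PySem.Dict.contains_iff_mem_keys d g).1 h1))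
        rw [if_pos (by simp [hmem]; simpa using hg)]
        exact ih _ _ (by rw [PySem.Dict.keys_insert_of_not_contains d l hc, h])
    · have hgc : PySem.Chars.isIn (PySem.Chars.lower g.toList) (PySem.Chars.lower l.toList) = false := by
        simpa using hg
      rw [if_neg hg, if_neg (by simp [hgc])]
      exact ih _ _ h

-- whole payload: A's key list as a nested accumulator loop
theorem pvKeys_outer (fs : List String) (L : List String) (d : PySem.Dict String String) (acc : List String)
    (h : d.keys = acc) :
    (L.foldl (fun info linea =>
        fs.foldl (fun info filtro => if PySem.Str.isIn (PySem.Str.lower filtro) (PySem.Str.lower linea) then info.insert filtro linea else info) info) d).keys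
    = L.foldl (fun orden linea =>
        fs.foldl (fun orden filtro =>
          if !(orden.contains filtro) && PySem.Str.isIn (PySem.Str.lower filtro) (PySem.Str.lower linea)
          then orden ++ [filtro] else orden) orden) acc := by
  induction L generalizing d acc with
  | nil => simpa using h
  | cons l L ih =>
    simp only [List.foldl_cons]
    exact ih _ _ (pvKeys_inner fs l d acc h)

-- B's lookup: a filter in filtros maps to its last matching line
theorem pvB_get? (L : List String) (fs : List String) (d : PySem.Dict String String) (f : String) :
    ((fs.foldl (fun info filtro =>
        match pvUltima L.reverse (PySem.Str.lower filtro) with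
        | some linea => info.insert filtro linea
        | none => info) d).get? f)
    = if f ∈ fs ∧ (pvUltima L.reverse (PySem.Str.lower f)).isSome = true
      then pvUltima L.reverse (PySem.Str.lower f) else d.get? f := by
  induction fs generalizing d with
  | nil => simp
  | cons g gs ih =>
    simp only [List.foldl_cons]
    rcases hg : pvUltima L.reverse (PySem.Str.lower g) with _ | v
    · by_cases hfg : f = g
      · subst hfg
        by_cases hgs : f ∈ gs <;> simp [hg, ih, hgs]
      · simp only [ih]
        by_cases hgs : f ∈ gs <;> simp [hfg, hgs]
    · by_cases hfg : f = g
      · subst hfg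
        by_cases hgs : f ∈ gs <;> simp [hg, ih, hgs]
      · simp only [ih]
        by_cases hgs : f ∈ gs <;> simp [hfg, hgs, PySem.Dict.get?_insert]

-- B's key list as a plain accumulator loop
theorem pvB_keys (L : List String) (fs : List String) (d : PySem.Dict String String) (acc : List String)
    (h : d.keys = acc) :
    (fs.foldl (fun info filtro =>
        match pvUltima L.reverse (PySem.Str.lower filtro) with
        | some linea => info.insert filtro linea
        | none => info) d).keys
    = fs.foldl (fun ks f =>
        if !(ks.contains f) && (pvUltima L.reverse (PySem.Str.lower f)).isSome
        then ks ++ [f] else ks) acc := by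
  induction fs generalizing d acc with
  | nil => simpa using h
  | cons g gs ih =>
    simp only [List.foldl_cons]
    rcases hg : pvUltima L.reverse (PySem.Str.lower g) with _ | v
    · rw [if_neg (by simp)]
      exact ih _ _ h
    · by_cases hmem : g ∈ acc
      · have hc : d.contains g = true := (PySem.Dict.contains_iff_mem_keys d g).2 (h ▸ hmem)
        rw [if_neg (by simp [hmem])]
        exact ih _ _ (by rw [PySem.Dict.keys_insert_of_contains d v hc, h])
      · have hc : d.contains g = false :=
          Bool.eq_false_iff.2 (fun h1 => hmem (h ▸ (PySem.Dict.contains_iff_mem_keys d g).1 h1))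
        rw [if_pos (by simp [hmem])]
        exact ih _ _ (by rw [PySem.Dict.keys_insert_of_not_contains d v hc, h])

-- the accumulate-if-new loop is a Set.update with the selected elements
theorem pvSel (p : String → Bool) (gs : List String) (o : List String) :
    gs.foldl (fun o f => if !(o.contains f) && p f then o ++ [f] else o) o
    = PySem.Set.update o (gs.filter p) := by
  induction gs generalizing o with
  | nil => simp [PySem.Set.update]
  | cons g gs ih =>
    simp only [List.foldl_cons, List.filter_cons]
    by_cases hp : p g = true
    · simp only [hp, Bool.and_true, if_pos]
      by_cases hm : g ∈ o
      · rw [if_neg (by simp [hm]), PySem.Set.update_cons, PySem.Set.add_of_mem hm]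
        exact ih o
      · rw [if_pos (by simp [hm]), PySem.Set.update_cons, PySem.Set.add_of_not_mem hm]
        exact ih (o ++ [g])
    · simp only [Bool.not_eq_true] at hp
      simp only [hp, Bool.and_false]
      exact ih o

-- folding Set.update over the lines builds ofList of the concatenation
theorem pvFold_update (M : List String) (blk : String → List String) (u : List String) :
    M.foldl (fun o l => PySem.Set.update o (blk l)) (PySem.Set.ofList u)
    = PySem.Set.ofList (u ++ M.flatMap blk) := by
  induction M generalizing u with
  | nil => simp
  | cons l M ih =>
    simp only [List.foldl_cons, List.flatMap_cons]
    rw [← PySem.Set.ofList_append, ih, List.append_assoc]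

-- discard of a list not containing the element is the identity
theorem pvDiscard_not_mem (t : List String) (x : String) (h : x ∉ t) :
    PySem.Set.discard t x = t := by
  simp only [PySem.Set.discard]
  rw [List.filter_eq_self]
  intro y hy
  simpa using (ne_of_mem_of_not_mem hy h)

-- filtering an ofList of a filter is the ofList of the conjunction filter
theorem pvQ_filter (p r : String → Bool) (xs : List String) :
    (PySem.Set.ofList (xs.filter p)).filter r
    = PySem.Set.ofList (xs.filter (fun x => p x && r x)) := by
  induction xs with
  | nil => simp
  | cons x xs ih =>
    by_cases hp : p x = true
    · have hcomm : ∀ (s : List String),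
          (PySem.Set.discard s x).filter r = PySem.Set.discard (s.filter r) x := by
        intro s
        simp only [PySem.Set.discard]
        rw [List.filter_filter, List.filter_filter]
        exact List.filter_congr (fun a _ => Bool.and_comm _ _)
      by_cases hr : r x = true
      · rw [List.filter_cons_of_pos hp,
            List.filter_cons_of_pos (p := fun y => p y && r y) (by simp [hp, hr]),
            PySem.Set.ofList_cons, PySem.Set.ofList_cons,
            List.filter_cons_of_pos hr, hcomm, ih]
      · have hr' : r x = false := by simpa using hr
        have hx : x ∉ PySem.Set.ofList (xs.filter fun y => p y && r y) := by
          intro hmem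
          rcases List.mem_filter.1 ((PySem.Set.mem_ofList _ _).1 hmem) with ⟨-, hpr⟩
          simp [hr'] at hpr
        rw [List.filter_cons_of_pos hp,
            List.filter_cons_of_neg (p := fun y => p y && r y) (by simp [hr']),
            PySem.Set.ofList_cons,
            List.filter_cons_of_neg (show ¬ (r x = true) by simp [hr']),
            hcomm, ih, pvDiscard_not_mem _ _ hx]
    · have hp' : p x = false := by simpa using hp
      rw [List.filter_cons_of_neg (show ¬ (p x = true) by simp [hp']),
          List.filter_cons_of_neg (p := fun y => p y && r y) (by simp [hp']), ih]
-- findIdx facts specialised to pvMatchIdx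
theorem pvMB_of_mIdx_eq (L : List String) (f : String) (k : Nat) (hk : k < L.length)
    (h : pvMatchIdx L f = k) :
    PySem.Str.isIn (PySem.Str.lower f) (PySem.Str.lower L[k]) = true := by
  subst h
  exact List.findIdx_getElem (w := hk)

theorem pvMIdx_le_of_mB (L : List String) (f : String) (k : Nat) (hk : k < L.length)
    (h : PySem.Str.isIn (PySem.Str.lower f) (PySem.Str.lower L[k]) = true) :
    pvMatchIdx L f ≤ k := by
  by_contra hlt
  exact absurd h (by simpa using List.not_of_lt_findIdx (Nat.lt_of_not_le hlt))

-- the reverse scan misses exactly when no line matches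
theorem pvUltima_eq_none_iff (M : List String) (f : String) :
    pvUltima M f = none ↔ ∀ l ∈ M, PySem.Str.isIn f (PySem.Str.lower l) = false := by
  induction M with
  | nil => simp [pvUltima]
  | cons l M ih =>
    by_cases h : PySem.Chars.isIn f.toList (PySem.Chars.lower l.toList) = true
    · simp [pvUltima, h]
    · have h' : PySem.Chars.isIn f.toList (PySem.Chars.lower l.toList) = false := by simpa using h
      simp [pvUltima, h', ih]

-- B's hit test is "first match before the end of the payload"
theorem pvQ_iff (L : List String) (f : String) :
    (pvUltima L.reverse (PySem.Str.lower f)).isSome = true ↔ pvMatchIdx L f < L.length := by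
  unfold pvMatchIdx
  rw [List.findIdx_lt_length, Option.isSome_iff_ne_none, Ne, pvUltima_eq_none_iff]
  constructor
  · intro h
    by_contra hnone
    apply h
    intro l hl
    by_contra hb
    apply hnone
    refine ⟨l, List.mem_reverse.1 hl, ?_⟩
    revert hb
    cases hc : PySem.Str.isIn (PySem.Str.lower f) (PySem.Str.lower l) <;> simp
  · rintro ⟨l, hl, hpb⟩ hall
    have h2 := hall l (List.mem_reverse.2 hl)
    rw [h2] at hpb
    simp at hpb

-- splitting the keys below a threshold, using the Pre_ order
theorem pvSplit (L : List String) (k : Nat) (hk : k < L.length) :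
    ∀ (fs : List String), List.Pairwise (pvR L) fs →
    PySem.Set.ofList (fs.filter (fun f => decide (pvMatchIdx L f < k + 1)))
    = PySem.Set.ofList (fs.filter (fun f => decide (pvMatchIdx L f < k)))
      ++ PySem.Set.ofList (fs.filter (fun f => decide (pvMatchIdx L f = k))) := by
  intro fs hp
  induction fs with
  | nil => simp
  | cons f fs ih =>
    have hR : ∀ g ∈ fs, pvR L f g := (List.pairwise_cons.1 hp).1
    have hp' := (List.pairwise_cons.1 hp).2
    by_cases h1 : pvMatchIdx L f < k
    · rw [List.filter_cons_of_pos (by simp; omega),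
          List.filter_cons_of_pos (by simp [h1]),
          List.filter_cons_of_neg (by simp; omega),
          PySem.Set.ofList_cons, PySem.Set.ofList_cons, ih hp', List.cons_append]
      congr 1
      simp only [PySem.Set.discard, List.filter_append]
      congr 1
      rw [List.filter_eq_self]
      intro y hy
      have hyk : pvMatchIdx L y = k := by
        have := List.mem_filter.1 ((PySem.Set.mem_ofList _ _).1 hy)
        simpa using this.2
      have hne : y ≠ f := fun he => by rw [he] at hyk; omega
      simpa using hne
    · by_cases h2 : pvMatchIdx L f = k
      · have hnil : fs.filter (fun g => decide (pvMatchIdx L g < k)) = [] := by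
          rw [List.filter_eq_nil_iff]
          intro g hg
          rcases hR g hg with he | he | he | he
          · subst he; simp; omega
          · simp; omega
          · simp; omega
          · simp; omega
        rw [List.filter_cons_of_pos (by simp; omega),
            List.filter_cons_of_neg (by simp; omega),
            List.filter_cons_of_pos (by simp [h2]),
            PySem.Set.ofList_cons, PySem.Set.ofList_cons, ih hp', hnil]
        have hnil2 : PySem.Set.ofList ([] : List String) = [] := rfl
        rw [hnil2]
        simp only [PySem.Set.discard, List.nil_append]
      · rw [List.filter_cons_of_neg (by simp; omega),
            List.filter_cons_of_neg (by simp; omega),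
            List.filter_cons_of_neg (by simp [h2])]
        exact ih hp'

-- the prefix invariant: keys discovered in the first k lines are the filters first matching there
theorem pvTake (L : List String) (fs : List String) (hp : List.Pairwise (pvR L) fs) :
    ∀ k, k ≤ L.length →
    PySem.Set.ofList ((L.take k).flatMap (fun l => fs.filter (fun f => PySem.Str.isIn (PySem.Str.lower f) (PySem.Str.lower l))))
    = PySem.Set.ofList (fs.filter (fun f => decide (pvMatchIdx L f < k))) := by
  intro k
  induction k with
  | zero => intro _; simp
  | succ k ih =>
    intro hk1
    have hk : k < L.length := hk1
    rw [List.take_succ_eq_append_getElem hk, List.flatMap_append, List.flatMap_cons, List.flatMap_nil,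
        List.append_nil, PySem.Set.ofList_append, ih (Nat.le_of_lt hk),
        PySem.Set.update_eq_append_filter, pvQ_filter]
    have hcongr : fs.filter (fun f =>
        PySem.Str.isIn (PySem.Str.lower f) (PySem.Str.lower L[k]) &&
        !(PySem.Set.contains (PySem.Set.ofList (fs.filter (fun f => decide (pvMatchIdx L f < k)))) f))
        = fs.filter (fun f => decide (pvMatchIdx L f = k)) := by
      apply List.filter_congr
      intro f hf
      have hmem : (PySem.Set.contains (PySem.Set.ofList (fs.filter (fun f => decide (pvMatchIdx L f < k)))) f) = decide (pvMatchIdx L f < k) := by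
        by_cases hlt : pvMatchIdx L f < k
        · simp only [PySem.Set.contains]
          have : f ∈ PySem.Set.ofList (fs.filter (fun f => decide (pvMatchIdx L f < k))) := by
            rw [PySem.Set.mem_ofList]
            exact List.mem_filter.2 ⟨hf, by simpa using hlt⟩
          simp [this, hlt]
        · simp only [PySem.Set.contains]
          have : f ∉ PySem.Set.ofList (fs.filter (fun f => decide (pvMatchIdx L f < k))) := by
            rw [PySem.Set.mem_ofList]
            intro hc
            exact hlt (by simpa using (List.mem_filter.1 hc).2)
          simp [this, hlt]
      rw [hmem]
      by_cases hb : PySem.Str.isIn (PySem.Str.lower f) (PySem.Str.lower L[k]) = true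
      · have hbC : PySem.Chars.isIn (PySem.Chars.lower f.toList) (PySem.Chars.lower L[k].toList) = true := by
          simpa using hb
        have hle : pvMatchIdx L f ≤ k := pvMIdx_le_of_mB L f k hk hb
        by_cases hlt : pvMatchIdx L f < k
        · have hnk : ¬ pvMatchIdx L f = k := by omega
          simp [hbC, hlt, hnk]
        · have hek : pvMatchIdx L f = k := by omega
          simp [hbC, hek]
      · have hbC : PySem.Chars.isIn (PySem.Chars.lower f.toList) (PySem.Chars.lower L[k].toList) = false := by
          simpa using hb
        have hnk : ¬ pvMatchIdx L f = k := fun he => absurd (pvMB_of_mIdx_eq L f k hk he) hb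
        simp [hbC, hnk]
    rw [hcongr, ← pvSplit L k hk fs hp]

-- ===== VERDICT (by name: the statement is the Claim_ definition above) =====
theorem extraer_campos_sip_spec : Claim_equal_extraer_campos_sip := by
  intro payload filtros _ hpre
  unfold Spec_extraer_campos_sip
  simp only [extraer_campos_sip, extraer_campos_sip_alt]
  have hpR : List.Pairwise (pvR (PySem.Str.splitlines payload)) filtros := hpre
  set L := PySem.Str.splitlines payload with hL
  set fs := filtros with hfs
  -- both key lists are ofList of the same selection
  have hAkeys :
      ((L.foldl (fun info linea =>
          fs.foldl (fun info filtro => if PySem.Str.isIn (PySem.Str.lower filtro) (PySem.Str.lower linea) then info.insert filtro linea else info) info)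
        (PySem.Dict.empty : PySem.Dict String String)).keys)
      = PySem.Set.ofList (fs.filter (fun f => (pvUltima L.reverse (PySem.Str.lower f)).isSome)) := by
    rw [pvKeys_outer fs L PySem.Dict.empty [] (by simp)]
    have hstep : (fun (orden : List String) (linea : String) =>
        fs.foldl (fun orden filtro =>
          if !(orden.contains filtro) && PySem.Str.isIn (PySem.Str.lower filtro) (PySem.Str.lower linea)
          then orden ++ [filtro] else orden) orden)
        = fun orden linea => PySem.Set.update orden (fs.filter (fun f => PySem.Str.isIn (PySem.Str.lower f) (PySem.Str.lower linea))) := by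
      funext orden linea
      exact pvSel _ fs orden
    rw [hstep]
    have h0 : ([] : List String) = PySem.Set.ofList [] := rfl
    rw [h0, pvFold_update, List.nil_append]
    have htake := pvTake L fs hpR L.length (Nat.le_refl _)
    rw [List.take_length] at htake
    rw [htake]
    apply congrArg
    apply List.filter_congr
    intro f _
    by_cases h : pvMatchIdx L f < L.length
    · simp [(pvQ_iff L f).2 h, h]
    · have : (pvUltima L.reverse (PySem.Str.lower f)).isSome = false := by
        rw [Bool.eq_false_iff]
        intro hs
        exact h ((pvQ_iff L f).1 hs)
      simp [this, h]
  have hBkeys :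
      ((fs.foldl (fun info filtro =>
          match pvUltima L.reverse (PySem.Str.lower filtro) with
          | some linea => info.insert filtro linea
          | none => info) (PySem.Dict.empty : PySem.Dict String String)).keys)
      = PySem.Set.ofList (fs.filter (fun f => (pvUltima L.reverse (PySem.Str.lower f)).isSome)) := by
    rw [pvB_keys L fs PySem.Dict.empty [] (by simp)]
    rw [pvSel (fun f => (pvUltima L.reverse (PySem.Str.lower f)).isSome) fs []]
    rfl
  -- items via keys
  rw [PySem.Dict.items_eq_map_keys _ (by rw [hAkeys]; exact PySem.Set.nodup_ofList _) "",
      PySem.Dict.items_eq_map_keys _ (by rw [hBkeys]; exact PySem.Set.nodup_ofList _) ""]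
  rw [hAkeys, hBkeys]
  apply List.map_congr_left
  intro f hf
  have hmemf := (PySem.Set.mem_ofList _ _).1 hf
  have hffs : f ∈ fs := (List.mem_filter.1 hmemf).1
  have hsome : (pvUltima L.reverse (PySem.Str.lower f)).isSome = true := by
    simpa using (List.mem_filter.1 hmemf).2
  have hA := pvA_outer_get? fs L PySem.Dict.empty f
  have hB := pvB_get? L fs PySem.Dict.empty f
  rw [if_pos hffs] at hA
  rw [if_pos ⟨hffs, hsome⟩] at hB
  simp only [PySem.Dict.get?_empty, Option.or_none] at hA
  rw [PySem.Dict.getD_eq_get?_getD, PySem.Dict.getD_eq_get?_getD, hA, hB]
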